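-- pv_equiv track=rewrite | github.com/YatchiYa/nano-banana-pro | back/main.py | calculate_video_segments
-- ===== SOURCE A (Python) =====
-- from typing import List, Optional, Dict
--
-- def calculate_video_segments(total_duration: int) -> List[int]:
--     """
--     Calculate how to break down a long video into segments.
--     First segment: 8 seconds, subsequent extensions: 7 seconds each
--     """
--     if total_duration <= 8:
--         return [total_duration]
--
--     segments = [8]  # First segment is always 8 seconds
--     remaining = total_duration - 8
--
--     while remaining > 0:
--         segment_duration = min(7, remaining)  # Extensions are 7 seconds max
--         segments.append(segment_duration)
--         remaining -= segment_duration
--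
--     return segments
-- ===== SOURCE B (Python) =====
-- def calculate_video_segments(total_duration: int):
--     if total_duration <= 8:
--         return [total_duration]
--     full, rem = divmod(total_duration - 8, 7)
--     return [8] + [7] * full + ([rem] if rem else [])
-- ===== Notes on version B (the rewrite author's own statement) =====
-- stated objective: simpler
-- what changed: Replaces the subtracting while-loop with a closed-form divmod: full 7s chunks by multiplication plus an optional remainder.
import Mathlib
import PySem

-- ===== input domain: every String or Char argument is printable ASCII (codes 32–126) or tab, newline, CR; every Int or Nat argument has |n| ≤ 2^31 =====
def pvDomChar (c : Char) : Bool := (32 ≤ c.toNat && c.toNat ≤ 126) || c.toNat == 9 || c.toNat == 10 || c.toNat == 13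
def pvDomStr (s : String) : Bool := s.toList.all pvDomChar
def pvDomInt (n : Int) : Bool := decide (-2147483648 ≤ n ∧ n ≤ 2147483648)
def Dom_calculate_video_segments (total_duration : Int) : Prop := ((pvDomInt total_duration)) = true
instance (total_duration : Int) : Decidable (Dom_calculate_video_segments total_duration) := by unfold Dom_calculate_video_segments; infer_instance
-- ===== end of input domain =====

-- B replaces A's subtracting while-loop with closed-form divmod arithmetic (objective: simpler).
-- ===== PORT A =====
def calculate_video_segments_loop (remaining : Int) (segments : List Int) : List Int :=
  if 0 < remaining then
    let segment_duration := min 7 remaining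
    calculate_video_segments_loop (remaining - segment_duration) (segments ++ [segment_duration])
  else segments
termination_by remaining.toNat
decreasing_by simp only [min_def]; split <;> omega

def calculate_video_segments (total_duration : Int) : List Int :=
  if total_duration ≤ 8 then [total_duration]
  else calculate_video_segments_loop (total_duration - 8) [8]

-- ===== PORT B =====
def calculate_video_segments_alt (total_duration : Int) : List Int :=
  if total_duration ≤ 8 then [total_duration]
  else
    let full := PySem.Int.floordiv (total_duration - 8) 7
    let rem := PySem.Int.mod (total_duration - 8) 7
    [8] ++ List.replicate full.toNat 7 ++ (if rem ≠ 0 then [rem] else [])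

-- ===== PRECONDITION & SPEC =====
def Spec_calculate_video_segments (total_duration : Int) (out : List Int) : Prop := out = calculate_video_segments_alt total_duration
instance (total_duration : Int) (out : List Int) : Decidable (Spec_calculate_video_segments total_duration out) := by unfold Spec_calculate_video_segments; infer_instance

-- ===== CLAIM (what is proved, stated in full; the proofs are below) =====
def Claim_equal_calculate_video_segments : Prop := ∀ (total_duration : Int), Dom_calculate_video_segments total_duration → Spec_calculate_video_segments total_duration (calculate_video_segments total_duration)

-- ===== LEMMAS AND PROOFS =====

-- ===== VERDICT (by name: the statement is the Claim_ definition above) =====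
-- loop characterisation: for 0 < r the loop appends ⌊r/7⌋ sevens and the nonzero remainder
theorem calculate_video_segments_loop_eq (n : Nat) (r : Int) (segs : List Int)
    (hn : r.toNat = n) (hr : 0 < r) :
    calculate_video_segments_loop r segs =
      segs ++ List.replicate (PySem.Int.floordiv r 7).toNat 7 ++
        (if PySem.Int.mod r 7 ≠ 0 then [PySem.Int.mod r 7] else []) := by
  induction n using Nat.strong_induction_on generalizing r segs with
  | _ n ih =>
    rw [calculate_video_segments_loop, if_pos hr]
    have hfd : PySem.Int.floordiv r 7 = r / 7 := PySem.Int.floordiv_eq_ediv_of_pos (by omega)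
    have hmd : PySem.Int.mod r 7 = r % 7 := PySem.Int.mod_eq_emod_of_pos (by omega)
    by_cases h7 : r ≤ 7
    · have hmin : min 7 r = r := by omega
      rw [hmin]
      rw [calculate_video_segments_loop, if_neg (by omega)]
      rw [hfd, hmd]
      by_cases he : r = 7
      · subst he
        norm_num [List.replicate]
      · have hq : r / 7 = 0 := Int.ediv_eq_zero_of_lt (by omega) (by omega)
        have hm : r % 7 = r := Int.emod_eq_of_lt (by omega) (by omega)
        simp [hq, hm]
        omega
    · have hmin : min 7 r = 7 := by omega
      rw [hmin]
      have := ih (r - 7).toNat (by omega) (r - 7) (segs ++ [7]) rfl (by omega)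
      rw [this]
      have hfd' : PySem.Int.floordiv (r - 7) 7 = (r - 7) / 7 := PySem.Int.floordiv_eq_ediv_of_pos (by omega)
      have hmd' : PySem.Int.mod (r - 7) 7 = (r - 7) % 7 := PySem.Int.mod_eq_emod_of_pos (by omega)
      have hq : (r - 7) / 7 = r / 7 - 1 := by omega
      have hm : (r - 7) % 7 = r % 7 := by omega
      have hq0 : 1 ≤ r / 7 := by omega
      rw [hfd, hmd, hfd', hmd', hq, hm]
      have : (r / 7).toNat = ((r / 7 - 1)).toNat + 1 := by omega
      rw [this, List.replicate_succ]
      simp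

theorem calculate_video_segments_spec : Claim_equal_calculate_video_segments := by
  intro t _
  unfold Spec_calculate_video_segments calculate_video_segments calculate_video_segments_alt
  by_cases h : t ≤ 8
  · simp [h]
  · rw [if_neg h, if_neg h]
    rw [calculate_video_segments_loop_eq (t - 8).toNat (t - 8) [8] rfl (by omega)]
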